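-- pv_equiv track=rewrite | github.com/anna-kight/advent-of-code-2025 | day_4/day_4.py | get_and_remove_num_accessable
-- ===== SOURCE A (Python) =====
-- def get_num_adj(diagram, location):
--   num_adj = 0
--   if location[0] > 0:
--     if diagram[location[0] - 1][location[1]] in ['@', 'x']: #Directly above
--       num_adj = num_adj + 1
--     if location[1] > 0 and diagram[location[0] - 1][location[1] - 1] in ['@', 'x']: #Up and to the left
--       num_adj = num_adj + 1
--     if location[1] < len(diagram[0]) - 1 and diagram[location[0] - 1][location[1] + 1] in ['@', 'x']: #Up and to the right
--       num_adj = num_adj + 1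
--
--   if location[0] < len(diagram) - 1:
--     if diagram[location[0] + 1][location[1]] in ['@', 'x']: #Directly below
--       num_adj = num_adj + 1
--     if location[1] > 0 and diagram[location[0] + 1][location[1] - 1] in ['@', 'x']: #Down and to the left
--       num_adj = num_adj + 1
--     if location[1] < len(diagram[0]) - 1 and diagram[location[0] + 1][location[1] + 1] in ['@', 'x']: #Down and to the right
--       num_adj = num_adj + 1
--
--   if location[1] > 0 and diagram[location[0]][location[1] - 1] in ['@', 'x']: #Directly to the left
--       num_adj = num_adj + 1
--
--   if location[1] < len(diagram[0]) - 1 and diagram[location[0]][location[1] + 1] in ['@', 'x']: #Directly to the right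
--       num_adj = num_adj + 1
--
--   return num_adj
--
-- def get_and_remove_num_accessable(diagram):
--   accessable = 0
--   for i in range(len(diagram)):
--     for j in range(len(diagram[0])):
--       if diagram[i][j] in ['@', 'x'] and get_num_adj(diagram, [i,j]) < 4:
--        accessable = accessable + 1
--        diagram[i][j] = 'x'
--   return accessable, diagram
-- ===== SOURCE B (Python) =====
-- def get_and_remove_num_accessable(diagram):
--   rows = len(diagram)
--   cols = len(diagram[0]) if diagram else 0
--
--   def nb(i, j):
--     return 1 if 0 <= i < rows and 0 <= j < cols and diagram[i][j] in ('@', 'x') else 0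
--
--   counts = [[sum(nb(i + di, j + dj)
--                  for di, dj in ((-1, -1), (-1, 0), (-1, 1), (0, -1),
--                                 (0, 1), (1, -1), (1, 0), (1, 1)))
--              for j in range(cols)]
--             for i in range(rows)]
--
--   accessable = 0
--   for i in range(rows):
--     for j in range(cols):
--       if diagram[i][j] in ('@', 'x') and counts[i][j] < 4:
--         accessable = accessable + 1
--         diagram[i][j] = 'x'
--   return accessable, diagram
-- ===== Notes on version B (the rewrite author's own statement) =====
-- stated objective: alternative
-- what changed: Replaces the interleaved per-cell neighbor probing (eight guarded if-chains evaluated on the partially mutated grid) with two separate passes: a precomputed 2D table of 8-neighbor marker counts built from the original grid, then a plain marking sweep that only consults the table; correct because mutation only rewrites '@'/'x' to 'x', which never changes marker membership.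
import Mathlib
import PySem

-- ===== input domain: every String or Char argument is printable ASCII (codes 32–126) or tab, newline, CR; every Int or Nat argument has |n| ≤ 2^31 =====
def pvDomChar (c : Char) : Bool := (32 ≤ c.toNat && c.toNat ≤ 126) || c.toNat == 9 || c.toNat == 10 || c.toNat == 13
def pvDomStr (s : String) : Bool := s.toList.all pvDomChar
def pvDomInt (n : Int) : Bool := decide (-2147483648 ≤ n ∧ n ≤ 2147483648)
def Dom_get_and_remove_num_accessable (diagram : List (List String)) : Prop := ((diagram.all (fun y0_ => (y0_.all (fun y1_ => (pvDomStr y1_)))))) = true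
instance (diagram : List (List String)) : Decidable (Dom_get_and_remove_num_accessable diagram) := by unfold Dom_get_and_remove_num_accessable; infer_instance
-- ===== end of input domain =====

-- B replaces A's interleaved on-demand neighbor probing with a precomputed neighbor-count
-- table followed by a plain marking sweep (a different two-pass decomposition, not faster).
-- Both A and B mutate `diagram` in place in Python (the same cells are set to 'x');
-- the equivalence proved here is about the returned pair.


-- ===== PORT A =====
-- `s in ['@', 'x']`
def pvIsMarker (s : String) : Bool := s == "@" || s == "x"

-- one `num_adj = num_adj + 1` step of get_num_adj, guarded by its condition
def pvBump (n : Int) (c : Prop) [Decidable c] : Int := if c then n + 1 else n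

-- transliteration of get_num_adj (location = [i, j], both nonnegative at every call
-- site); under Pre_ every index that is read is in range, so `getD` with default "" is
-- exact (pvIsMarker "" = false is never reached on admitted inputs)
def get_num_adj (diagram : List (List String)) (i j : Nat) : Int :=
  let n0 : Int := 0
  let n1 := pvBump n0 (0 < i ∧ pvIsMarker ((diagram.getD (i-1) []).getD j ""))
  let n2 := pvBump n1 (0 < i ∧ 0 < j ∧ pvIsMarker ((diagram.getD (i-1) []).getD (j-1) ""))
  let n3 := pvBump n2 (0 < i ∧ j < (diagram.headD []).length - 1 ∧ pvIsMarker ((diagram.getD (i-1) []).getD (j+1) ""))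
  let n4 := pvBump n3 (i < diagram.length - 1 ∧ pvIsMarker ((diagram.getD (i+1) []).getD j ""))
  let n5 := pvBump n4 (i < diagram.length - 1 ∧ 0 < j ∧ pvIsMarker ((diagram.getD (i+1) []).getD (j-1) ""))
  let n6 := pvBump n5 (i < diagram.length - 1 ∧ j < (diagram.headD []).length - 1 ∧ pvIsMarker ((diagram.getD (i+1) []).getD (j+1) ""))
  let n7 := pvBump n6 (0 < j ∧ pvIsMarker ((diagram.getD i []).getD (j-1) ""))
  let n8 := pvBump n7 (j < (diagram.headD []).length - 1 ∧ pvIsMarker ((diagram.getD i []).getD (j+1) ""))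
  n8

def get_and_remove_num_accessable (diagram : List (List String)) : Int × List (List String) :=
  (List.range diagram.length).foldl (fun st i =>
    (List.range ((st.2.headD []).length)).foldl (fun st2 j =>
      if pvIsMarker ((st2.2.getD i []).getD j "") ∧ get_num_adj st2.2 i j < 4 then
        (st2.1 + 1, st2.2.set i ((st2.2.getD i []).set j "x"))
      else st2) st) (0, diagram)

-- ===== PORT B =====
-- `nb(i, j)` of Source B: 1 if (i, j) is in bounds and holds a marker, else 0
def pvNb (diagram : List (List String)) (rows cols : Nat) (i j : Int) : Int :=
  if 0 ≤ i ∧ i < (rows : Int) ∧ 0 ≤ j ∧ j < (cols : Int) ∧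
      pvIsMarker ((diagram.getD i.toNat []).getD j.toNat "") then 1 else 0

-- the `sum(nb(i + di, j + dj) for di, dj in …)` entry of Source B's table
def pvCountAt (diagram : List (List String)) (rows cols i j : Nat) : Int :=
  ([(-1,-1),(-1,0),(-1,1),(0,-1),(0,1),(1,-1),(1,0),(1,1)] : List (Int × Int)).foldl
    (fun s d => s + pvNb diagram rows cols ((i : Int) + d.1) ((j : Int) + d.2)) 0

-- the precomputed `counts` table of Source B
def pvCounts (diagram : List (List String)) (rows cols : Nat) : List (List Int) :=
  (List.range rows).map (fun i => (List.range cols).map (fun j => pvCountAt diagram rows cols i j))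

def get_and_remove_num_accessable_alt (diagram : List (List String)) : Int × List (List String) :=
  let rows := diagram.length
  let cols := (diagram.headD []).length
  let counts := pvCounts diagram rows cols
  (List.range rows).foldl (fun st i =>
    (List.range cols).foldl (fun st2 j =>
      if pvIsMarker ((st2.2.getD i []).getD j "") ∧ (counts.getD i []).getD j 0 < 4 then
        (st2.1 + 1, st2.2.set i ((st2.2.getD i []).set j "x"))
      else st2) st) (0, diagram)

-- ===== PRECONDITION & SPEC =====
-- Pre_ excludes exactly the inputs where the Python A raises IndexError: a grid with a
-- row strictly shorter than row 0 (the loop indexes every row at every column of row 0).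
def Pre_get_and_remove_num_accessable (diagram : List (List String)) : Prop :=
  ∀ row ∈ diagram, (diagram.headD []).length ≤ row.length
instance (diagram : List (List String)) : Decidable (Pre_get_and_remove_num_accessable diagram) := by unfold Pre_get_and_remove_num_accessable; infer_instance

def pvWitness_get_and_remove_num_accessable : List (List String) :=
  [["@", ".", "x"], ["x", "@", "@"], [".", "@", "."]]

def Spec_get_and_remove_num_accessable (diagram : List (List String)) (out : Int × List (List String)) : Prop := out = get_and_remove_num_accessable_alt diagram
instance (diagram : List (List String)) (out : Int × List (List String)) : Decidable (Spec_get_and_remove_num_accessable diagram out) := by unfold Spec_get_and_remove_num_accessable; infer_instance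

-- ===== CLAIM (what is proved, stated in full; the proofs are below) =====
def Claim_equal_get_and_remove_num_accessable : Prop := ∀ (diagram : List (List String)), Dom_get_and_remove_num_accessable diagram → Pre_get_and_remove_num_accessable diagram → Spec_get_and_remove_num_accessable diagram (get_and_remove_num_accessable diagram)

-- ===== LEMMAS AND PROOFS =====

-- the marker mask of a grid: everything either computation inspects besides lengths
def pvMark (g : List (List String)) : List (List Bool) := g.map (fun r => r.map pvIsMarker)

theorem pvMark_len (g : List (List String)) : (pvMark g).length = g.length := by
  simp [pvMark]

theorem pvMark_headD_len (g g' : List (List String)) (h : pvMark g = pvMark g') :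
    (g.headD []).length = (g'.headD []).length := by
  have hd : ∀ x : List (List String), (pvMark x).headD [] = (x.headD []).map pvIsMarker := by
    intro x; cases x <;> rfl
  have h1 : ((pvMark g).headD []).length = (g.headD []).length := by rw [hd]; simp
  have h2 : ((pvMark g').headD []).length = (g'.headD []).length := by rw [hd]; simp
  rw [← h1, ← h2, h]

theorem pvMark_cell (g : List (List String)) (i j : Nat) :
    pvIsMarker ((g.getD i []).getD j "") = ((pvMark g).getD i []).getD j false := by
  have h1 : (pvMark g).getD i [] = (g.getD i []).map pvIsMarker := by
    have := List.getD_map (n := i) g ([] : List String) (fun r => r.map pvIsMarker)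
    simpa [pvMark] using this
  rw [h1]
  have := List.getD_map (n := j) (g.getD i []) ("" : String) pvIsMarker
  simpa [pvIsMarker] using this.symm

-- get_num_adj only looks at the marker mask (and lengths derivable from it)
theorem adj_congr (g g' : List (List String)) (i j : Nat) (h : pvMark g = pvMark g') :
    get_num_adj g i j = get_num_adj g' i j := by
  have hlen : g.length = g'.length := by rw [← pvMark_len g, ← pvMark_len g', h]
  have hhead := pvMark_headD_len g g' h
  simp only [get_num_adj, pvMark_cell, h, hlen, hhead]

-- marking a marker cell with "x" does not change the mask
theorem pvMark_set (g : List (List String)) (i j : Nat)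
    (hm : pvIsMarker ((g.getD i []).getD j "") = true) :
    pvMark (g.set i ((g.getD i []).set j "x")) = pvMark g := by
  have hmark_empty : pvIsMarker "" = false := rfl
  by_cases hi : i < g.length
  · by_cases hj : j < (g.getD i []).length
    · have hrow : g.getD i [] = g[i] := List.getD_eq_getElem g [] hi
      have hj' : j < g[i].length := hrow ▸ hj
      simp only [pvMark, List.map_set, hrow]
      have hcell2 : (g.getD i []).getD j "" = g[i][j]'hj' := by
        conv_lhs => rw [hrow]
        exact List.getD_eq_getElem _ "" hj'
      have hval : pvIsMarker "x" = (g[i].map pvIsMarker)[j]'(by simpa using hj') := by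
        rw [List.getElem_map]
        show true = _
        rw [← hm, hcell2]
      rw [hval, List.set_getElem_self]
      have houter : (g[i].map pvIsMarker)
          = (g.map (fun r => r.map pvIsMarker))[i]'(by simpa using hi) := by
        rw [List.getElem_map]
      rw [houter, List.set_getElem_self]
    · have : (g.getD i []).getD j "" = "" := List.getD_eq_default _ "" (by omega)
      rw [this, hmark_empty] at hm; cases hm
  · have h0 : g.getD i [] = [] := List.getD_eq_default g [] (by omega)
    rw [h0] at hm
    simp [hmark_empty] at hm

-- Source B's nb, characterized: a guard plus the cell's marker bit (Nat coordinates)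
theorem nb_eq1 (d : List (List String)) (rows cols : Nat) (x y : Int) (p q : Nat) (G : Prop) [Decidable G]
    (h1 : G → x = p ∧ y = q ∧ p < rows ∧ q < cols)
    (h2 : ¬G → x < 0 ∨ (rows : Int) ≤ x ∨ y < 0 ∨ (cols : Int) ≤ y) :
    pvNb d rows cols x y
      = if G then (if pvIsMarker ((d.getD p []).getD q "") then (1:Int) else 0) else 0 := by
  by_cases hg : G
  · obtain ⟨hx, hy, hp, hq⟩ := h1 hg
    subst hx; subst hy
    rw [if_pos hg]
    unfold pvNb
    refine if_congr ?_ rfl rfl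
    constructor
    · intro hc; simpa using hc.2.2.2.2
    · intro hm
      exact ⟨by omega, by omega, by omega, by omega, by simpa using hm⟩
  · rw [if_neg hg]
    unfold pvNb
    rw [if_neg]
    rintro ⟨c1, c2, c3, c4, c5⟩
    rcases h2 hg with h | h | h | h <;> omega

theorem pvBump_flat (x : Int) (c : Prop) [Decidable c] : pvBump x c = x + (if c then 1 else 0) := by
  unfold pvBump; split <;> ring

-- the precomputed table agrees with A's on-demand count on the same grid
set_option maxHeartbeats 1000000 in
theorem counts_correct (d : List (List String)) (i j : Nat)
    (hi : i < d.length) (hj : j < (d.headD []).length) :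
    ((pvCounts d d.length ((d.headD []).length)).getD i []).getD j 0 = get_num_adj d i j := by
  set rows := d.length with hrows
  set cols := (d.headD []).length with hcols
  have hlk : ((pvCounts d rows cols).getD i []).getD j 0 = pvCountAt d rows cols i j := by
    unfold pvCounts
    rw [List.getD_eq_getElem _ [] (by simpa using hi)]
    simp only [List.getElem_map, List.getElem_range]
    rw [List.getD_eq_getElem _ 0 (by simpa using hj)]
    simp only [List.getElem_map, List.getElem_range]
  rw [hlk]
  unfold pvCountAt
  simp only [List.foldl_cons, List.foldl_nil]
  have eUL := nb_eq1 d rows cols ((i:Int) + -1) ((j:Int) + -1) (i-1) (j-1) (0 < i ∧ 0 < j)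
      (fun hg => ⟨by omega, by omega, by omega, by omega⟩) (fun hg => by omega)
  have eU := nb_eq1 d rows cols ((i:Int) + -1) ((j:Int) + 0) (i-1) j (0 < i)
      (fun hg => ⟨by omega, by omega, by omega, by omega⟩) (fun hg => by omega)
  have eUR := nb_eq1 d rows cols ((i:Int) + -1) ((j:Int) + 1) (i-1) (j+1) (0 < i ∧ j < cols - 1)
      (fun hg => ⟨by omega, by omega, by omega, by omega⟩) (fun hg => by omega)
  have eL := nb_eq1 d rows cols ((i:Int) + 0) ((j:Int) + -1) i (j-1) (0 < j)
      (fun hg => ⟨by omega, by omega, by omega, by omega⟩) (fun hg => by omega)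
  have eR := nb_eq1 d rows cols ((i:Int) + 0) ((j:Int) + 1) i (j+1) (j < cols - 1)
      (fun hg => ⟨by omega, by omega, by omega, by omega⟩) (fun hg => by omega)
  have eDL := nb_eq1 d rows cols ((i:Int) + 1) ((j:Int) + -1) (i+1) (j-1) (i < rows - 1 ∧ 0 < j)
      (fun hg => ⟨by omega, by omega, by omega, by omega⟩) (fun hg => by omega)
  have eD := nb_eq1 d rows cols ((i:Int) + 1) ((j:Int) + 0) (i+1) j (i < rows - 1)
      (fun hg => ⟨by omega, by omega, by omega, by omega⟩) (fun hg => by omega)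
  have eDR := nb_eq1 d rows cols ((i:Int) + 1) ((j:Int) + 1) (i+1) (j+1) (i < rows - 1 ∧ j < cols - 1)
      (fun hg => ⟨by omega, by omega, by omega, by omega⟩) (fun hg => by omega)
  rw [eUL, eU, eUR, eL, eR, eDL, eD, eDR]
  unfold get_num_adj
  rw [← hcols, ← hrows]
  simp only [pvBump_flat, ite_and]
  ring

-- the inner loop over columns: A's on-demand condition and B's table condition agree,
-- and the marker mask is preserved
theorem inner_loop (d0 : List (List String)) (i : Nat) (hi : i < d0.length)
    (js : List Nat) (hjs : ∀ j ∈ js, j < (d0.headD []).length)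
    (st : Int × List (List String)) (hM : pvMark st.2 = pvMark d0) :
    (js.foldl (fun st2 j =>
        if pvIsMarker ((st2.2.getD i []).getD j "") ∧ get_num_adj st2.2 i j < 4 then
          (st2.1 + 1, st2.2.set i ((st2.2.getD i []).set j "x"))
        else st2) st
      = js.foldl (fun st2 j =>
        if pvIsMarker ((st2.2.getD i []).getD j "") ∧
            ((pvCounts d0 d0.length ((d0.headD []).length)).getD i []).getD j 0 < 4 then
          (st2.1 + 1, st2.2.set i ((st2.2.getD i []).set j "x"))
        else st2) st)
    ∧ pvMark (js.foldl (fun st2 j =>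
        if pvIsMarker ((st2.2.getD i []).getD j "") ∧
            ((pvCounts d0 d0.length ((d0.headD []).length)).getD i []).getD j 0 < 4 then
          (st2.1 + 1, st2.2.set i ((st2.2.getD i []).set j "x"))
        else st2) st).2 = pvMark d0 := by
  induction js generalizing st with
  | nil => exact ⟨rfl, hM⟩
  | cons j js ih =>
    have hj : j < (d0.headD []).length := hjs j (List.mem_cons_self)
    have hadj : get_num_adj st.2 i j
        = ((pvCounts d0 d0.length ((d0.headD []).length)).getD i []).getD j 0 := by
      rw [adj_congr st.2 d0 i j hM, counts_correct d0 i j hi hj]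
    have hstep : (if pvIsMarker ((st.2.getD i []).getD j "") ∧ get_num_adj st.2 i j < 4 then
          (st.1 + 1, st.2.set i ((st.2.getD i []).set j "x")) else st)
        = (if pvIsMarker ((st.2.getD i []).getD j "") ∧
            ((pvCounts d0 d0.length ((d0.headD []).length)).getD i []).getD j 0 < 4 then
          (st.1 + 1, st.2.set i ((st.2.getD i []).set j "x")) else st) := by
      rw [hadj]
    have hMnext : pvMark (if pvIsMarker ((st.2.getD i []).getD j "") ∧
            ((pvCounts d0 d0.length ((d0.headD []).length)).getD i []).getD j 0 < 4 then
          (st.1 + 1, st.2.set i ((st.2.getD i []).set j "x")) else st).2 = pvMark d0 := by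
      split
      · next hc => rw [pvMark_set st.2 i j hc.1, hM]
      · exact hM
    simp only [List.foldl_cons]
    rw [hstep]
    exact ih (fun j hjm => hjs j (List.mem_cons_of_mem _ hjm)) _ hMnext

-- the outer loop over rows
theorem outer_loop (d0 : List (List String))
    (is : List Nat) (his : ∀ i ∈ is, i < d0.length)
    (st : Int × List (List String)) (hM : pvMark st.2 = pvMark d0) :
    (is.foldl (fun st i =>
        (List.range ((st.2.headD []).length)).foldl (fun st2 j =>
          if pvIsMarker ((st2.2.getD i []).getD j "") ∧ get_num_adj st2.2 i j < 4 then
            (st2.1 + 1, st2.2.set i ((st2.2.getD i []).set j "x"))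
          else st2) st) st
      = is.foldl (fun st i =>
        (List.range ((d0.headD []).length)).foldl (fun st2 j =>
          if pvIsMarker ((st2.2.getD i []).getD j "") ∧
              ((pvCounts d0 d0.length ((d0.headD []).length)).getD i []).getD j 0 < 4 then
            (st2.1 + 1, st2.2.set i ((st2.2.getD i []).set j "x"))
          else st2) st) st)
    ∧ pvMark (is.foldl (fun st i =>
        (List.range ((d0.headD []).length)).foldl (fun st2 j =>
          if pvIsMarker ((st2.2.getD i []).getD j "") ∧
              ((pvCounts d0 d0.length ((d0.headD []).length)).getD i []).getD j 0 < 4 then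
            (st2.1 + 1, st2.2.set i ((st2.2.getD i []).set j "x"))
          else st2) st) st).2 = pvMark d0 := by
  induction is generalizing st with
  | nil => exact ⟨rfl, hM⟩
  | cons i is ih =>
    have hi : i < d0.length := his i (List.mem_cons_self)
    have hbound : (st.2.headD []).length = (d0.headD []).length :=
      pvMark_headD_len st.2 d0 hM
    have hin := inner_loop d0 i hi (List.range ((d0.headD []).length))
      (fun j hjm => (List.mem_range).1 hjm) st hM
    simp only [List.foldl_cons]
    rw [hbound, hin.1]
    exact ih (fun i him => his i (List.mem_cons_of_mem _ him)) _ hin.2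

-- ===== VERDICT (by name: the statement is the Claim_ definition above) =====
theorem get_and_remove_num_accessable_spec : Claim_equal_get_and_remove_num_accessable := by
  intro diagram _ _
  show get_and_remove_num_accessable diagram = get_and_remove_num_accessable_alt diagram
  unfold get_and_remove_num_accessable get_and_remove_num_accessable_alt
  exact (outer_loop diagram (List.range diagram.length)
    (fun i him => (List.mem_range).1 him) (0, diagram) rfl).1
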